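-- pv_equiv track=rewrite | github.com/YuanXianguo/Python-Interview-Master | Exam/百词斩/03求未知原子相对原子量.py | get_m
-- ===== SOURCE A (Python) =====
-- def get_m(string, m, nums):
--     flag = 0
--     tmp = 0
--     index = 0
--     n = len(string)
--     res = 0
--     cnt = 0
--     flag2 = 0
--     while index < n:
--         if string[index] == "(":
--             flag = 1
--             index += 1
--         elif string[index].isalpha():
--             if flag:
--                 if string[index+1].isdigit():
--                     tmp += nums[string[index]] * int(string[index+1])
--                     index += 2
--                 else:
--                     tmp += nums[string[index]]
--                     index += 1
--             else:
--                 if string[index+1].isdigit():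
--                     res += nums[string[index]] * int(string[index+1])
--                     index += 2
--                 else:
--                     res += nums[string[index]]
--                     index += 1
--         elif string[index] == ")":
--             res += tmp * int(string[index+1])
--             if flag2:
--                 cnt *= int(string[index+1])
--             index += 2
--         else:
--             cnt = 1
--             if flag:
--                 flag2 = 1
--             if string[index+1].isdigit():
--                 cnt *= int(string[index+1])
--                 index += 2
--             else:
--                 index += 1
--     return (m-res) // cnt
-- ===== SOURCE B (Python) =====
-- def get_m(string, m, nums):
--     # Tokenize the formula once into (kind, value) tokens, then compute res and
--     # cnt with two independent single-purpose passes over the token list.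
--     toks = []
--     i, n = 0, len(string)
--     while i < n:
--         c = string[i]
--         if c == "(":
--             toks.append(("open", 0))
--             i += 1
--         else:
--             if i + 1 < n and string[i + 1].isdigit():
--                 k = int(string[i + 1])
--                 i += 2
--             else:
--                 k = 1
--                 i += 1
--             if c == ")":
--                 toks.append(("close", k))
--             elif c.isalpha():
--                 toks.append(("elem", nums[c] * k))
--             else:
--                 toks.append(("unk", k))
--     res = 0
--     tmp = 0
--     inner = False
--     for t, v in toks:
--         if t == "open":
--             inner = True
--         elif t == "elem":
--             if inner:
--                 tmp += v
--             else:
--                 res += v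
--         elif t == "close":
--             res += tmp * v
--     cnt = 0
--     seen = False
--     inner = False
--     for t, v in toks:
--         if t == "open":
--             inner = True
--         elif t == "unk":
--             cnt = v
--             if inner:
--                 seen = True
--         elif t == "close":
--             if seen:
--                 cnt *= v
--     return (m - res) // cnt
-- ===== Notes on version B (the rewrite author's own statement) =====
-- stated objective: alternative
-- what changed: A's single index-driven while loop with five interleaved state variables is re-decomposed into a one-shot tokenizer (element/open/close/unknown tokens with their multipliers) followed by two independent single-purpose passes over the token list, one computing res and one computing cnt.
import Mathlib
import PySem

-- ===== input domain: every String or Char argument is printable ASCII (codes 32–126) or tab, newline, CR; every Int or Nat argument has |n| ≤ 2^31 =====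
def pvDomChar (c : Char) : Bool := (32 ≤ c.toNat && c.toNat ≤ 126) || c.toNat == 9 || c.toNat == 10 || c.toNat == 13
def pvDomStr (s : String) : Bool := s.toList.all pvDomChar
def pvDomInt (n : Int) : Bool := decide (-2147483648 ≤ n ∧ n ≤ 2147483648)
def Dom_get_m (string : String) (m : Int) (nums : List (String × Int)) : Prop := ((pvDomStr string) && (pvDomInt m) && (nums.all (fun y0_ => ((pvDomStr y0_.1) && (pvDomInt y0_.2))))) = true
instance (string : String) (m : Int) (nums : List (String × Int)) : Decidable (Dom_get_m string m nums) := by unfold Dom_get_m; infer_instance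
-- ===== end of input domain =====

-- B re-decomposes A's single indexed scan as tokenize-once + two single-purpose passes
-- (one for res, one for cnt); same values on every input where A returns (objective: alternative).

-- shared with B: nums[c] (Python dict lookup of the 1-char string) and int(d) for a digit char
def pvLook (nums : List (String × Int)) (c : Char) : Int :=
  (PySem.Dict.mk nums).getD (String.ofList [c]) 0
def pvDigit (c : Char) : Int := (c.toNat : Int) - 48  -- exact for '0'..'9' (the only use, guarded by isdigit/Pre_)

-- ===== PORT A =====
-- A's while loop: state (flag, tmp, res, cnt, flag2); where Python raises (IndexError on
-- string[index+1], ValueError at ')', and KeyError/ZeroDivisionError) Pre_get_m excludes the input.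
def loopA (nums : List (String × Int)) : List Char → Bool → Int → Int → Int → Bool → Int × Int
  | [], _, _, res, cnt, _ => (res, cnt)
  | [c], flag, tmp, res, cnt, flag2 =>
    if c = '(' then loopA nums [] true tmp res cnt flag2
    else (res, cnt)  -- IndexError on string[index+1]: outside Pre_
  | c :: d :: rest', flag, tmp, res, cnt, flag2 =>
    if c = '(' then loopA nums (d :: rest') true tmp res cnt flag2
    else if PySem.Chars.isalpha c then
      if flag then
        if PySem.Chars.isdigit d then
          loopA nums rest' flag (tmp + pvLook nums c * pvDigit d) res cnt flag2
        else loopA nums (d :: rest') flag (tmp + pvLook nums c) res cnt flag2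
      else
        if PySem.Chars.isdigit d then
          loopA nums rest' flag tmp (res + pvLook nums c * pvDigit d) cnt flag2
        else loopA nums (d :: rest') flag tmp (res + pvLook nums c) cnt flag2
    else if c = ')' then
      if PySem.Chars.isdigit d then
        loopA nums rest' flag tmp (res + tmp * pvDigit d)
          (if flag2 then cnt * pvDigit d else cnt) flag2
      else (res, cnt)  -- ValueError from int(): outside Pre_
    else
      if PySem.Chars.isdigit d then
        loopA nums rest' flag tmp res (1 * pvDigit d) (if flag then true else flag2)
      else loopA nums (d :: rest') flag tmp res 1 (if flag then true else flag2)

def get_m (string : String) (m : Int) (nums : List (String × Int)) : Int :=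
  let r := loopA nums string.toList false 0 0 0 false
  PySem.Int.floordiv (m - r.1) r.2

-- ===== PORT B =====
def tokB (nums : List (String × Int)) (c : Char) (k : Int) : String × Int :=
  if c = ')' then ("close", k)
  else if PySem.Chars.isalpha c then ("elem", pvLook nums c * k)
  else ("unk", k)

def tokenizeB (nums : List (String × Int)) : List Char → List (String × Int)
  | [] => []
  | [c] => if c = '(' then [("open", 0)] else [tokB nums c 1]
  | c :: d :: rest' =>
    if c = '(' then ("open", 0) :: tokenizeB nums (d :: rest')
    else if PySem.Chars.isdigit d then tokB nums c (pvDigit d) :: tokenizeB nums rest'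
    else tokB nums c 1 :: tokenizeB nums (d :: rest')

def resPass : List (String × Int) → Bool → Int → Int → Int
  | [], _, _, res => res
  | (t, v) :: r, inner, tmp, res =>
    if t = "open" then resPass r true tmp res
    else if t = "elem" then
      (if inner then resPass r inner (tmp + v) res else resPass r inner tmp (res + v))
    else if t = "close" then resPass r inner tmp (res + tmp * v)
    else resPass r inner tmp res

def cntPass : List (String × Int) → Bool → Bool → Int → Int
  | [], _, _, cnt => cnt
  | (t, v) :: r, inner, seen, cnt =>
    if t = "open" then cntPass r true seen cnt
    else if t = "unk" then cntPass r inner (if inner then true else seen) v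
    else if t = "close" then cntPass r inner seen (if seen then cnt * v else cnt)
    else cntPass r inner seen cnt

def get_m_alt (string : String) (m : Int) (nums : List (String × Int)) : Int :=
  let toks := tokenizeB nums string.toList
  PySem.Int.floordiv (m - resPass toks false 0 0) (cntPass toks false false 0)

-- ===== PRECONDITION & SPEC =====
-- preOk is a grammar/validity check on the formula string (no result is computed): every
-- non-'(' char must have a successor when A peeks at string[index+1], ')' must be followed
-- by a digit, every letter must be a key of nums, and the final unknown-atom count must be
-- nonzero (z tracks exactly "cnt ≠ 0"). Pre_ excludes precisely the inputs on which the
-- Python A raises (IndexError / ValueError / KeyError / ZeroDivisionError).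
def preOk (nums : List (String × Int)) : List Char → Bool → Bool → Bool → Bool
  | [], _, _, z => z
  | [c], flag, flag2, z => if c = '(' then preOk nums [] true flag2 z else false
  | c :: d :: rest', flag, flag2, z =>
    if c = '(' then preOk nums (d :: rest') true flag2 z
    else if PySem.Chars.isalpha c then
      ((PySem.Dict.mk nums).get? (String.ofList [c])).isSome &&
      (if PySem.Chars.isdigit d then preOk nums rest' flag flag2 z
       else preOk nums (d :: rest') flag flag2 z)
    else if c = ')' then
      PySem.Chars.isdigit d &&
      preOk nums rest' flag flag2 (if flag2 then z && decide (d ≠ '0') else z)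
    else
      if PySem.Chars.isdigit d then
        preOk nums rest' flag (flag || flag2) (decide (d ≠ '0'))
      else preOk nums (d :: rest') flag (flag || flag2) true

def Pre_get_m (string : String) (m : Int) (nums : List (String × Int)) : Prop :=
  preOk nums string.toList false false false = true
instance (string : String) (m : Int) (nums : List (String × Int)) : Decidable (Pre_get_m string m nums) := by unfold Pre_get_m; infer_instance

def pvWitness_get_m : String × Int × (List (String × Int)) := ("H2*3", 20, [("H", 1)])

def Spec_get_m (string : String) (m : Int) (nums : List (String × Int)) (out : Int) : Prop := out = get_m_alt string m nums
instance (string : String) (m : Int) (nums : List (String × Int)) (out : Int) : Decidable (Spec_get_m string m nums out) := by unfold Spec_get_m; infer_instance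

-- ===== CLAIM (what is proved, stated in full; the proofs are below) =====
def Claim_equal_get_m : Prop := ∀ (string : String) (m : Int) (nums : List (String × Int)), Dom_get_m string m nums → Pre_get_m string m nums → Spec_get_m string m nums (get_m string m nums)

-- ===== LEMMAS AND PROOFS =====

-- On valid suffixes (preOk with the current flag/flag2), A's loop equals B's two passes over
-- the tokens of that suffix, for every state. Strong induction on the length (steps eat 1 or 2 chars).
theorem loopA_eq_passes : ∀ (n : Nat) (cs : List Char), cs.length ≤ n →
    ∀ (nums : List (String × Int)) (flag flag2 z : Bool) (tmp res cnt : Int),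
    preOk nums cs flag flag2 z = true →
    loopA nums cs flag tmp res cnt flag2 =
      (resPass (tokenizeB nums cs) flag tmp res, cntPass (tokenizeB nums cs) flag flag2 cnt) := by
  intro n
  induction n with
  | zero =>
    intro cs hlen nums flag flag2 z tmp res cnt _
    have : cs = [] := List.eq_nil_of_length_eq_zero (Nat.le_zero.mp hlen)
    subst this
    simp [loopA, tokenizeB, resPass, cntPass]
  | succ n ih =>
    intro cs hlen nums flag flag2 z tmp res cnt hpre
    match cs with
    | [] => simp [loopA, tokenizeB, resPass, cntPass]
    | [c] =>
      by_cases hop : c = '('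
      · simp [loopA, tokenizeB, resPass, cntPass, hop]
      · simp [preOk, hop] at hpre
    | c :: d :: rest' =>
      have hrest : (d :: rest').length ≤ n := by simp at hlen ⊢; omega
      have hrest' : rest'.length ≤ n := by simp at hlen; omega
      by_cases hop : c = '('
      · simp only [loopA, tokenizeB, if_pos hop]
        simp only [preOk, if_pos hop] at hpre
        rw [ih (d :: rest') hrest nums true flag2 z tmp res cnt hpre]
        simp [resPass, cntPass]
      · by_cases hal : PySem.Chars.isalpha c = true
        · have hcp : ¬ c = ')' := by
            intro h; subst h; revert hal; decide
          simp only [preOk, if_neg hop, hal, if_true] at hpre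
          simp only [Bool.and_eq_true] at hpre
          have hpre' := hpre.2
          by_cases hd : PySem.Chars.isdigit d = true
          · simp only [loopA, tokenizeB, if_neg hop, hal, if_true, hd, tokB, if_neg hcp]
            simp only [hd, if_true] at hpre'
            rw [ih rest' hrest' nums flag flag2 z _ _ cnt hpre',
                ih rest' hrest' nums flag flag2 z tmp _ cnt hpre']
            cases flag <;> simp [resPass, cntPass]
          · simp only [loopA, tokenizeB, if_neg hop, hal, if_true, hd, tokB, if_neg hcp,
              Bool.false_eq_true, if_false]
            simp only [hd, Bool.false_eq_true, if_false] at hpre'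
            rw [ih (d :: rest') hrest nums flag flag2 z _ _ cnt hpre',
                ih (d :: rest') hrest nums flag flag2 z tmp _ cnt hpre']
            cases flag <;> simp [resPass, cntPass]
        · by_cases hcl : c = ')'
          · simp only [preOk, if_neg hop, hal, Bool.false_eq_true, if_false, if_pos hcl] at hpre
            simp only [Bool.and_eq_true] at hpre
            obtain ⟨hd, hpre'⟩ := hpre
            simp only [loopA, tokenizeB, if_neg hop, hal, Bool.false_eq_true, if_false,
              if_pos hcl, hd, if_true, tokB]
            rw [ih rest' hrest' nums flag flag2 _ tmp _ _ hpre']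
            simp [resPass, cntPass]
          · simp only [preOk, if_neg hop, hal, Bool.false_eq_true, if_false, if_neg hcl] at hpre
            simp only [loopA, tokenizeB, if_neg hop, hal, Bool.false_eq_true, if_false,
              if_neg hcl, tokB]
            by_cases hd : PySem.Chars.isdigit d = true
            · simp only [hd, if_true] at hpre ⊢
              cases flag
              · rw [if_neg (by decide), ih rest' hrest' nums false flag2 _ tmp res _ (by simpa using hpre)]
                simp [resPass, cntPass]
              · rw [if_pos rfl, ih rest' hrest' nums true true _ tmp res _ (by simpa using hpre)]
                simp [resPass, cntPass]
            · simp only [hd, Bool.false_eq_true, if_false] at hpre ⊢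
              cases flag
              · rw [if_neg (by decide), ih (d :: rest') hrest nums false flag2 _ tmp res _ (by simpa using hpre)]
                simp [resPass, cntPass]
              · rw [if_pos rfl, ih (d :: rest') hrest nums true true _ tmp res _ (by simpa using hpre)]
                simp [resPass, cntPass]

-- ===== VERDICT (by name: the statement is the Claim_ definition above) =====
theorem get_m_spec : Claim_equal_get_m := by
  intro string m nums _ hpre
  unfold Spec_get_m get_m get_m_alt
  rw [loopA_eq_passes string.toList.length string.toList le_rfl nums false false false 0 0 0 hpre]
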